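-- pv_equiv track=rewrite | github.com/pypi-data/pypi-mirror-303 | packages/evidi-fabric/evidi_fabric-1.2.4-py3-none-any.whl/evidi_fabric/notebook.py | clean_notebook_content
-- ===== SOURCE A (Python) =====
-- def clean_notebook_content(notebook_content: str) -> str:
--     """
--     Clean the notebook content from the cell magic commands
--     """
--     lines = notebook_content.split("\n")
--     # Filter out lines that start with '%'
--     filtered_lines = [line for line in lines if not line.strip().startswith("%") and not line.strip().startswith("#")]
--
--     # Replace !pip install with pass (if in try, except block) else remove
--     filtered_lines = ["    pass" if line[:16] == "    !pip install" else line for line in filtered_lines]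
--     filtered_lines = ["\tpass" if line[:13] == "\t!pip install" else line for line in filtered_lines]
--     filtered_lines = [line for line in filtered_lines if not line.strip()[:12] == "!pip install"]
--     # Join the filtered lines back into a single string
--     cleaned_notebook_content = "\n".join(filtered_lines)
--     return cleaned_notebook_content
-- ===== SOURCE B (Python) =====
-- def _clean_line(line):
--     """Classify one line: None = drop it, else the (possibly replaced) line."""
--     s = line.strip()
--     if s.startswith("%") or s.startswith("#"):
--         return None
--     if line[:16] == "    !pip install":
--         return "    pass"
--     if line[:13] == "\t!pip install":
--         return "\tpass"
--     if s[:12] == "!pip install":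
--         return None
--     return line
--
--
-- def clean_notebook_content(notebook_content: str) -> str:
--     """
--     Clean the notebook content from the cell magic commands
--     """
--     out = []
--     for line in notebook_content.split("\n"):
--         cleaned = _clean_line(line)
--         if cleaned is not None:
--             out.append(cleaned)
--     return "\n".join(out)
-- ===== Notes on version B (the rewrite author's own statement) =====
-- stated objective: simpler
-- what changed: Replaces A's four sequential filter/map passes over the line list with a single pass using a per-line classifier helper that decides drop/replace/keep in one if-chain.
import Mathlib
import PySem

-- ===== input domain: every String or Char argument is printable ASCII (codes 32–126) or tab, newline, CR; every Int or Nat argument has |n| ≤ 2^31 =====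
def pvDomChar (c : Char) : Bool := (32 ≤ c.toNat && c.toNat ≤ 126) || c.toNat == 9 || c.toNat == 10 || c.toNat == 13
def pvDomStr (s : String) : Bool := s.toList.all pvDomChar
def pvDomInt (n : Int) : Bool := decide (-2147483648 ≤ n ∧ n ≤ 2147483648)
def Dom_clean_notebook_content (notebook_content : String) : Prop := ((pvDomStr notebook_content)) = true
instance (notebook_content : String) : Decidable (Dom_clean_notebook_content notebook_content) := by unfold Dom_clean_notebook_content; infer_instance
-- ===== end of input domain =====

-- One pass with a per-line classifier instead of A's four sequential filter/map passes (objective: simpler).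

-- ===== PORT A =====
def clean_notebook_content (notebook_content : String) : String :=
  let lines := (PySem.Str.split? notebook_content "\n").getD []
  let filtered_lines := lines.filter (fun line =>
    !(PySem.Str.startswith (PySem.Str.strip line) "%") &&
    !(PySem.Str.startswith (PySem.Str.strip line) "#"))
  let filtered_lines := filtered_lines.map (fun line =>
    if PySem.Str.slice line none (some 16) == "    !pip install" then "    pass" else line)
  let filtered_lines := filtered_lines.map (fun line =>
    if PySem.Str.slice line none (some 13) == "\t!pip install" then "\tpass" else line)
  let filtered_lines := filtered_lines.filter (fun line =>
    !(PySem.Str.slice (PySem.Str.strip line) none (some 12) == "!pip install"))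
  PySem.Str.join "\n" filtered_lines

-- ===== PORT B =====
def pvCleanLine (line : String) : Option String :=
  let s := PySem.Str.strip line
  if PySem.Str.startswith s "%" || PySem.Str.startswith s "#" then none
  else if PySem.Str.slice line none (some 16) == "    !pip install" then some "    pass"
  else if PySem.Str.slice line none (some 13) == "\t!pip install" then some "\tpass"
  else if PySem.Str.slice s none (some 12) == "!pip install" then none
  else some line

def clean_notebook_content_alt (notebook_content : String) : String :=
  PySem.Str.join "\n"
    (((PySem.Str.split? notebook_content "\n").getD []).filterMap pvCleanLine)

-- ===== PRECONDITION & SPEC =====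
def Spec_clean_notebook_content (notebook_content : String) (out : String) : Prop := out = clean_notebook_content_alt notebook_content
instance (notebook_content : String) (out : String) : Decidable (Spec_clean_notebook_content notebook_content out) := by unfold Spec_clean_notebook_content; infer_instance

-- ===== CLAIM (what is proved, stated in full; the proofs are below) =====
def Claim_equal_clean_notebook_content : Prop := ∀ (notebook_content : String), Dom_clean_notebook_content notebook_content → Spec_clean_notebook_content notebook_content (clean_notebook_content notebook_content)

-- ===== LEMMAS AND PROOFS =====

-- fusing A's four passes into the single filterMap of B
theorem pvPipeline_eq (l : List String) :
    ((((l.filter (fun line =>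
        !(PySem.Str.startswith (PySem.Str.strip line) "%") &&
        !(PySem.Str.startswith (PySem.Str.strip line) "#"))).map (fun line =>
        if PySem.Str.slice line none (some 16) == "    !pip install" then "    pass" else line)).map (fun line =>
        if PySem.Str.slice line none (some 13) == "\t!pip install" then "\tpass" else line)).filter (fun line =>
        !(PySem.Str.slice (PySem.Str.strip line) none (some 12) == "!pip install")))
    = l.filterMap pvCleanLine := by
  induction l with
  | nil => rfl
  | cons x xs ih =>
    have cA : (PySem.Str.slice "    pass" none (some 13) == "\t!pip install") = false := by decide
    have cB : (PySem.Str.slice (PySem.Str.strip "    pass") none (some 12) == "!pip install") = false := by decide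
    have cC : (PySem.Str.slice (PySem.Str.strip "\tpass") none (some 12) == "!pip install") = false := by decide
    rw [List.filter_cons, List.filterMap_cons]
    by_cases h1 : (!(PySem.Str.startswith (PySem.Str.strip x) "%") &&
        !(PySem.Str.startswith (PySem.Str.strip x) "#")) = true
    · rw [if_pos h1, List.map_cons, List.map_cons, List.filter_cons]
      have h1' : (PySem.Str.startswith (PySem.Str.strip x) "%" ||
          PySem.Str.startswith (PySem.Str.strip x) "#") = false := by
        rw [Bool.and_eq_true, Bool.not_eq_true', Bool.not_eq_true'] at h1
        rw [h1.1, h1.2]; rfl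
      by_cases h2 : (PySem.Str.slice x none (some 16) == "    !pip install") = true
      · simp only [pvCleanLine, h1', Bool.false_eq_true, if_false, h2, if_true, cA, cB,
          Bool.not_false, ih]
      · rw [if_neg h2]
        by_cases h3 : (PySem.Str.slice x none (some 13) == "\t!pip install") = true
        · simp only [pvCleanLine, h1', Bool.false_eq_true, if_false, h2, h3, if_true, cC,
            Bool.not_false, ih]
        · rw [if_neg h3]
          by_cases h4 : (PySem.Str.slice (PySem.Str.strip x) none (some 12) == "!pip install") = true
          · simp only [pvCleanLine, h1', Bool.false_eq_true, if_false, h2, h3, h4, if_true,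
              Bool.not_true, ih]
          · simp only [pvCleanLine, h1', Bool.false_eq_true, if_false, h2, h3, h4,
              Bool.not_false, if_true, ih]
    · rw [if_neg h1]
      have h1' : (PySem.Str.startswith (PySem.Str.strip x) "%" ||
          PySem.Str.startswith (PySem.Str.strip x) "#") = true := by
        cases ha : PySem.Str.startswith (PySem.Str.strip x) "%" <;>
          cases hb : PySem.Str.startswith (PySem.Str.strip x) "#" <;>
            first | rfl | (simp at ha hb; simp [ha, hb] at h1)
      simp only [pvCleanLine, h1', if_true, ih]

-- ===== VERDICT (by name: the statement is the Claim_ definition above) =====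
theorem clean_notebook_content_spec : Claim_equal_clean_notebook_content := by
  intro s _
  unfold Spec_clean_notebook_content clean_notebook_content clean_notebook_content_alt
  exact congrArg (PySem.Str.join "\n") (pvPipeline_eq _)
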